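-- pv_equiv track=rewrite | github.com/PaddlePaddle/Paddle | python/paddle/fluid/tests/unittests/dygraph_to_static/test_static_analysis.py | func_to_test2
-- ===== SOURCE A (Python) =====
-- def func_to_test2(x):
--     for i in range(10):
--         x += i
--     m = 3
--     while m < 8:
--         m += 1
--     if x < 0:
--         return 0
--     else:
--         return x
-- ===== SOURCE B (Python) =====
-- def func_to_test2(x):
--     # Closed form: the loop adds 0+1+...+9 = 45; the while-loop is dead; clamp at 0.
--     return max(x + 45, 0)
-- ===== Notes on version B (the rewrite author's own statement) =====
-- stated objective: simpler
-- what changed: Replaced the fixed-count accumulation loop and dead while-loop with the closed form max(x + 45, 0).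
import Mathlib
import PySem

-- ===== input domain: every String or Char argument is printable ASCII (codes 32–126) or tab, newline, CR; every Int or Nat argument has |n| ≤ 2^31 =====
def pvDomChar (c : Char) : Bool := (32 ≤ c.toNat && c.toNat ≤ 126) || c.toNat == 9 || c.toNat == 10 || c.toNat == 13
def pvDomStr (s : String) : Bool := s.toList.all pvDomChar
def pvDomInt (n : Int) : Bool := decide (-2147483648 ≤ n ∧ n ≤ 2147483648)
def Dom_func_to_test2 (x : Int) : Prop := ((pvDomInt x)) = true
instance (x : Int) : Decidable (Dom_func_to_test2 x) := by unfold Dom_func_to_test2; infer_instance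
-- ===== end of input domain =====

-- B: closed form max(x+45,0) replaces A's accumulation loop and dead while-loop (objective: simpler).
-- ===== PORT A =====
-- while m < 8: m += 1, as structural recursion on 8 - m
def func_to_test2_while (m : Int) : Int :=
  if m < 8 then func_to_test2_while (m + 1) else m
termination_by (8 - m).toNat
decreasing_by omega
def func_to_test2 (x : Int) : Int :=
  -- for i in range(10): x += i
  let x := (PySem.List.pyRange 0 10 1).foldl (fun x i => x + i) x
  -- m = 3; while m < 8: m += 1  (loop terminates; m unused afterwards) — bounded recursion below
  let m := func_to_test2_while 3
  let _ := m
  if x < 0 then 0 else x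

-- ===== PORT B =====
def func_to_test2_alt (x : Int) : Int := max (x + 45) 0

-- ===== PRECONDITION & SPEC =====
def Spec_func_to_test2 (x : Int) (out : Int) : Prop := out = func_to_test2_alt x
instance (x : Int) (out : Int) : Decidable (Spec_func_to_test2 x out) := by unfold Spec_func_to_test2; infer_instance

-- ===== CLAIM (what is proved, stated in full; the proofs are below) =====
def Claim_equal_func_to_test2 : Prop := ∀ (x : Int), Dom_func_to_test2 x → Spec_func_to_test2 x (func_to_test2 x)

-- ===== LEMMAS AND PROOFS =====

-- ===== VERDICT (by name: the statement is the Claim_ definition above) =====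
theorem func_to_test2_spec : Claim_equal_func_to_test2 := by
  intro x _
  unfold Spec_func_to_test2 func_to_test2 func_to_test2_alt
  simp [PySem.List.pyRange, List.range_succ]
  omega
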